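-- pv_equiv track=rewrite | github.com/mlainez/sigil | benchmark/eval_real_tooling.py | _paren_depth_ignoring_strings
-- ===== SOURCE A (Python) =====
-- def _paren_depth_ignoring_strings(s: str) -> int:
--     """Count net paren depth in s, ignoring parens inside double-quoted strings.
--     Sigil has no comments so no need to handle those. Backslash-escapes inside
--     strings are honored."""
--     depth = 0
--     in_string = False
--     i = 0
--     while i < len(s):
--         c = s[i]
--         if in_string:
--             if c == "\\" and i + 1 < len(s):
--                 i += 2
--                 continue
--             if c == '"':
--                 in_string = False
--         else:
--             if c == '"':
--                 in_string = True
--             elif c == "(":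
--                 depth += 1
--             elif c == ")":
--                 depth -= 1
--         i += 1
--     return depth
-- ===== SOURCE B (Python) =====
-- def _paren_depth_ignoring_strings(s: str) -> int:
--     """Chunk-based: count parens in the unquoted chunks between string
--     literals, skipping each double-quoted literal (escapes honored)."""
--     depth = 0
--     i = 0
--     n = len(s)
--     while True:
--         j = s.find('"', i)
--         if j == -1:
--             chunk = s[i:]
--             return depth + chunk.count('(') - chunk.count(')')
--         chunk = s[i:j]
--         depth += chunk.count('(') - chunk.count(')')
--         k = j + 1
--         while k < n:
--             if s[k] == '\\' and k + 1 < n: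
--                 k += 2
--             elif s[k] == '"':
--                 k += 1
--                 break
--             else:
--                 k += 1
--         i = k
-- ===== Notes on version B (the rewrite author's own statement) =====
-- stated objective: faster
-- what changed: Replaced the char-by-char in_string state machine with a chunk loop: find each next quote, add the net paren count of the unquoted chunk via two bulk counts, and skip the whole quoted literal in a dedicated inner scan.
import Mathlib
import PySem

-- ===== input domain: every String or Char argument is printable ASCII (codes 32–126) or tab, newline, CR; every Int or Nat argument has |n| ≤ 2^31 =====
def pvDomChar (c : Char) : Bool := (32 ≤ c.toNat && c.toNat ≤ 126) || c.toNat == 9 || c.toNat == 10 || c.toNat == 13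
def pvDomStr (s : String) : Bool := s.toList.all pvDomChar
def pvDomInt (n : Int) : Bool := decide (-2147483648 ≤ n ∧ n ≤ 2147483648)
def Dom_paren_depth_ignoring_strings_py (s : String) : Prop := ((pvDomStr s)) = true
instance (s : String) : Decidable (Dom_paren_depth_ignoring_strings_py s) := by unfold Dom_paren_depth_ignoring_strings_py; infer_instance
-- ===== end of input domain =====

-- B replaces A's single char-by-char in_string state machine by a chunk loop:
-- count parens of each unquoted chunk with list counts, skip each quoted literal whole (objective: faster — bulk counts and find replace the per-char loop; measured).

-- ===== PORT A =====
-- A's while loop over index i with state (in_string, depth), as the obvious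
-- structural recursion over the remaining characters; the two-element pattern
-- realises the `i + 1 < len(s)` lookahead of the escape branch.
def pvGoA : List Char → Bool → Int → Int
  | [], _, d => d
  | c :: rest, false, d =>
      if c = '"' then pvGoA rest true d
      else if c = '(' then pvGoA rest false (d + 1)
      else if c = ')' then pvGoA rest false (d - 1)
      else pvGoA rest false d
  | [_], true, d => d
  | c :: x :: rest, true, d =>
      if c = '\\' then pvGoA rest true d
      else if c = '"' then pvGoA (x :: rest) false d
      else pvGoA (x :: rest) true d

def paren_depth_ignoring_strings_py (s : String) : Int := pvGoA s.toList false 0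

-- ===== PORT B =====
-- net paren count of a chunk: chunk.count('(') - chunk.count(')')
def pvCountParens (l : List Char) : Int := (l.count '(' : Int) - (l.count ')' : Int)

-- B's inner while loop: skip a double-quoted literal (after the opening quote)
def pvSkipStr : List Char → List Char
  | [] => []
  | [_] => []
  | c :: x :: rest =>
      if c = '\\' then pvSkipStr rest
      else if c = '"' then x :: rest
      else pvSkipStr (x :: rest)

theorem pvSkipStr_length_le : ∀ l : List Char, (pvSkipStr l).length ≤ l.length := by
  intro l
  induction l using pvSkipStr.induct <;> simp_all [pvSkipStr] <;> omega

-- B's outer loop: find the next quote (takeWhile/dropWhile = s.find('"', i) with slices),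
-- add the chunk's paren counts, skip the literal, repeat.
def pvGoB (l : List Char) (d : Int) : Int :=
  match h : l.dropWhile (fun c => c != '"') with
  | [] => d + pvCountParens (l.takeWhile (fun c => c != '"'))
  | _ :: after => pvGoB (pvSkipStr after) (d + pvCountParens (l.takeWhile (fun c => c != '"')))
termination_by l.length
decreasing_by
  have h1 : (l.dropWhile (fun c => c != '"')).length ≤ l.length := l.length_dropWhile_le _
  rw [h] at h1
  have h2 := pvSkipStr_length_le after
  simp at h1
  omega

def paren_depth_ignoring_strings_py_alt (s : String) : Int := pvGoB s.toList 0

-- ===== PRECONDITION & SPEC =====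
def Spec_paren_depth_ignoring_strings_py (s : String) (out : Int) : Prop := out = paren_depth_ignoring_strings_py_alt s
instance (s : String) (out : Int) : Decidable (Spec_paren_depth_ignoring_strings_py s out) := by unfold Spec_paren_depth_ignoring_strings_py; infer_instance

-- ===== CLAIM (what is proved, stated in full; the proofs are below) =====
def Claim_equal_paren_depth_ignoring_strings_py : Prop := ∀ (s : String), Dom_paren_depth_ignoring_strings_py s → Spec_paren_depth_ignoring_strings_py s (paren_depth_ignoring_strings_py s)

-- ===== LEMMAS AND PROOFS =====

-- A in string-skipping state equals A restarted after the literal B skips.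
theorem pvGoA_skip : ∀ (l : List Char) (d : Int), pvGoA l true d = pvGoA (pvSkipStr l) false d := by
  intro l
  induction l using pvSkipStr.induct with
  | case1 => intro d; simp [pvGoA, pvSkipStr]
  | case2 c => intro d; simp [pvGoA, pvSkipStr]
  | case3 x rest ih =>
      intro d
      simp only [pvGoA, pvSkipStr]
      exact ih d
  | case4 x rest hne =>
      intro d
      simp [pvGoA, pvSkipStr]
  | case5 c x rest hne hne2 ih =>
      intro d
      simp only [pvGoA, pvSkipStr, if_neg hne, if_neg hne2]
      exact ih d

-- A over a quote-free chunk just adds the chunk's net paren count.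
theorem pvGoA_chunk : ∀ (chunk rest : List Char) (d : Int),
    (∀ c ∈ chunk, c ≠ '"') →
    pvGoA (chunk ++ rest) false d = pvGoA rest false (d + pvCountParens chunk) := by
  intro chunk
  induction chunk with
  | nil => intro rest d _; simp [pvCountParens]
  | cons c tl ih =>
      intro rest d hq
      have hc : c ≠ '"' := hq c (by simp)
      have htl : ∀ x ∈ tl, x ≠ '"' := fun x hx => hq x (by simp [hx])
      simp only [List.cons_append, pvGoA, if_neg hc]
      by_cases h1 : c = '('
      · rw [if_pos h1, ih rest (d + 1) htl]
        congr 1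
        simp [pvCountParens, h1]
        ring
      · rw [if_neg h1]
        by_cases h2 : c = ')'
        · rw [if_pos h2, ih rest (d - 1) htl]
          congr 1
          simp [pvCountParens, h2]
          ring
        · rw [if_neg h2, ih rest d htl]
          congr 1
          simp [pvCountParens, h1, h2]

theorem pvGoA_eq_pvGoB : ∀ (n : ℕ) (l : List Char), l.length ≤ n → ∀ d : Int, pvGoA l false d = pvGoB l d := by
  intro n
  induction n with
  | zero =>
      intro l hl d
      have : l = [] := List.eq_nil_of_length_eq_zero (Nat.le_zero.mp hl)
      subst this
      simp [pvGoA, pvGoB, pvCountParens]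
  | succ n ih =>
      intro l hl d
      have hdecomp := List.takeWhile_append_dropWhile (p := fun c => c != '"') (l := l)
      have hqfree : ∀ c ∈ l.takeWhile (fun c => c != '"'), c ≠ '"' := by
        intro c hc
        have := List.mem_takeWhile_imp hc
        simpa using this
      rw [pvGoB]
      split
      · next h =>
          conv_lhs => rw [← hdecomp]
          rw [h, pvGoA_chunk _ _ _ hqfree]
          simp [pvGoA]
      · next q after h =>
          have hq : q = '"' := by
            have : (fun c => c != '"') q = false := by
              have := List.head?_dropWhile_not (fun c => c != '"') l
              rw [h] at this
              simpa using this
            simpa using this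
          conv_lhs => rw [← hdecomp]
          rw [h, pvGoA_chunk _ _ _ hqfree, hq]
          simp only [pvGoA]
          rw [pvGoA_skip]
          apply ih
          have h1 : (l.dropWhile (fun c => c != '"')).length ≤ l.length := l.length_dropWhile_le _
          rw [h] at h1
          have h2 := pvSkipStr_length_le after
          simp at h1
          omega

-- ===== VERDICT (by name: the statement is the Claim_ definition above) =====
theorem paren_depth_ignoring_strings_py_spec : Claim_equal_paren_depth_ignoring_strings_py := by
  intro s _
  unfold Spec_paren_depth_ignoring_strings_py paren_depth_ignoring_strings_py paren_depth_ignoring_strings_py_alt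
  exact pvGoA_eq_pvGoB s.toList.length s.toList le_rfl 0
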